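-- pv_equiv track=rewrite | github.com/SDET-SOLOMAN/code_wars_python | kata_7s/please_help_bob.py | err_bob
-- ===== SOURCE A (Python) =====
-- def err_bob(st):
--     x = "auioe"
--
--     d = {
--         True: "ERR",
--         False: "err"
--     }
--
--     w = ""
--     temp = ""
--
--     for i, char in enumerate(st):
--         if char.isalpha():
--             temp += char
--         else:
--             if temp and temp[-1].lower() not in x:
--                 temp += d[temp[-1].isupper()]
--             w += temp + char
--             temp = ""
--
--     return w if not temp else w + temp if temp[-1].lower() in x else w + temp + d[temp[-1].isupper()]
-- ===== SOURCE B (Python) =====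
-- def err_bob(st):
--     out = []
--     i = 0
--     n = len(st)
--     while i < n:
--         j = i
--         alpha = st[i].isalpha()
--         while j < n and st[j].isalpha() == alpha:
--             j += 1
--         run = st[i:j]
--         out.append(run)
--         if alpha and run[-1].lower() not in "auioe":
--             out.append("ERR" if run[-1].isupper() else "err")
--         i = j
--     return "".join(out)
-- ===== Notes on version B (the rewrite author's own statement) =====
-- stated objective: simpler
-- what changed: B scans the string as whole maximal alpha/non-alpha runs (a hand-rolled groupby: outer while over runs, inner while finding each run's end, pieces joined at the end), instead of A's char-by-char loop threading a word accumulator plus a duplicated flush expression in the return.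
import Mathlib
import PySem

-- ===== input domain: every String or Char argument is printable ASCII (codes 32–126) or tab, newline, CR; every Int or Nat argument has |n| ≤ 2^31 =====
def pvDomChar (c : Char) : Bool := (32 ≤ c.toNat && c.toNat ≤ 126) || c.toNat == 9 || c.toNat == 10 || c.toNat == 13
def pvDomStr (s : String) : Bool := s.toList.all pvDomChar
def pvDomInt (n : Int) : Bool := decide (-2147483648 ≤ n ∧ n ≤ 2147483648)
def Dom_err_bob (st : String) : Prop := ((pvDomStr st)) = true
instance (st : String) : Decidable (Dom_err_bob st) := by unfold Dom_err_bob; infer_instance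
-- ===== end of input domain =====

-- B processes whole alpha/non-alpha runs (token-based) instead of A's char-by-char accumulator; objective: simpler decomposition, same cost.

-- ===== PORT A =====
-- the vowel string x = "auioe"
def pvVowelsA : List Char := ['a', 'u', 'i', 'o', 'e']

-- d[b] for the dict {True: "ERR", False: "err"}
def pvSfxA (c : Char) : List Char :=
  if PySem.Chars.isupper c then ['E', 'R', 'R'] else ['e', 'r', 'r']

-- one iteration of A's for-loop over (w, temp)
def pvStepA (s : List Char × List Char) (c : Char) : List Char × List Char :=
  if PySem.Chars.isalpha c then (s.1, s.2 ++ [c])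
  else
    let temp' :=
      match s.2.getLast? with        -- 'temp and …': empty temp skips the branch
      | none => s.2
      | some l => if PySem.Chars.lowerChar l ∉ pvVowelsA then s.2 ++ pvSfxA l else s.2
    (s.1 ++ temp' ++ [c], [])

-- A's final return expression on the loop state
def pvFinalA (s : List Char × List Char) : List Char :=
  match s.2.getLast? with
  | none => s.1
  | some l =>
      if PySem.Chars.lowerChar l ∈ pvVowelsA then s.1 ++ s.2
      else s.1 ++ s.2 ++ pvSfxA l

def err_bob (st : String) : String :=
  String.mk (pvFinalA (st.toList.foldl pvStepA ([], [])))

-- ===== PORT B =====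
def pvSfxB (c : Char) : List Char :=
  if PySem.Chars.isupper c then ['E', 'R', 'R'] else ['e', 'r', 'r']

-- the outer while-loop: take one maximal run of equal isalpha-class, emit it (plus
-- the err suffix for a consonant-ending alpha run), continue on the remainder
def pvGoB : List Char → List Char
  | [] => []
  | c :: rest =>
    let run := c :: rest.takeWhile (fun d => PySem.Chars.isalpha d == PySem.Chars.isalpha c)
    let rem := rest.dropWhile (fun d => PySem.Chars.isalpha d == PySem.Chars.isalpha c)
    (if PySem.Chars.isalpha c then
       match run.getLast? with
       | none => run
       | some l => if PySem.Chars.lowerChar l ∉ ['a', 'u', 'i', 'o', 'e'] then run ++ pvSfxB l else run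
     else run) ++ pvGoB rem
  termination_by cs => cs.length
  decreasing_by
    have := List.length_dropWhile_le (fun d => PySem.Chars.isalpha d == PySem.Chars.isalpha c) rest
    simp; omega

def err_bob_alt (st : String) : String := String.mk (pvGoB st.toList)

-- ===== PRECONDITION & SPEC =====
def Spec_err_bob (st : String) (out : String) : Prop := out = err_bob_alt st
instance (st : String) (out : String) : Decidable (Spec_err_bob st out) := by unfold Spec_err_bob; infer_instance

-- ===== CLAIM (what is proved, stated in full; the proofs are below) =====
def Claim_equal_err_bob : Prop := ∀ (st : String), Dom_err_bob st → Spec_err_bob st (err_bob st)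

-- ===== LEMMAS AND PROOFS =====

-- A's accumulator w is only ever appended to
theorem pvFoldA_w (cs : List Char) : ∀ (w temp : List Char),
    cs.foldl pvStepA (w, temp) =
      (w ++ (cs.foldl pvStepA ([], temp)).1, (cs.foldl pvStepA ([], temp)).2) := by
  induction cs with
  | nil => intro w temp; simp
  | cons c cs ih =>
    intro w temp
    simp only [List.foldl_cons, pvStepA]
    by_cases h : PySem.Chars.isalpha c
    · simp only [h, if_true]
      exact ih w (temp ++ [c])
    · have h' : PySem.Chars.isalpha c = false := by simpa using h
      simp only [h', Bool.false_eq_true, if_false]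
      conv_lhs => rw [ih]
      conv_rhs => rw [ih]
      simp

theorem pvTakeWhile_all {p : Char → Bool} {l : List Char} (h : ∀ x ∈ l, p x = true) :
    l.takeWhile p = l ∧ l.dropWhile p = [] := by
  induction l with
  | nil => simp
  | cons a l ih =>
    have ha := h a (by simp)
    have := ih (fun x hx => h x (by simp [hx]))
    simp [List.takeWhile_cons, List.dropWhile_cons, ha, this]

theorem pvTakeWhile_append {p : Char → Bool} {l r : List Char} {c : Char}
    (hl : ∀ x ∈ l, p x = true) (hc : p c = false) :
    (l ++ c :: r).takeWhile p = l ∧ (l ++ c :: r).dropWhile p = c :: r := by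
  induction l with
  | nil => simp [List.takeWhile_cons, List.dropWhile_cons, hc]
  | cons a l ih =>
    have ha := hl a (by simp)
    have := ih (fun x hx => hl x (by simp [hx]))
    simp [List.takeWhile_cons, List.dropWhile_cons, ha, this]

-- pvGoB absorbs a leading non-alpha character one at a time
theorem pvGoB_cons_nonalpha {c : Char} (h : PySem.Chars.isalpha c = false) (l : List Char) :
    pvGoB (c :: l) = c :: pvGoB l := by
  rw [pvGoB]
  simp only [h, Bool.false_eq_true, if_false]
  cases l with
  | nil => simp [pvGoB]
  | cons d ds =>
    by_cases hd : PySem.Chars.isalpha d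
    · simp [List.takeWhile_cons, List.dropWhile_cons, hd, h]
    · conv_rhs => rw [pvGoB]
      have hd' : PySem.Chars.isalpha d = false := by simpa using hd
      simp [List.takeWhile_cons, List.dropWhile_cons, hd', h]

-- main invariant: running A's loop from ([], temp) with temp all-alpha, then finalizing,
-- is B's token pass over temp ++ cs
theorem pvGoB_nil : pvGoB [] = [] := by rw [pvGoB]

-- pvGoB on an alpha run followed by a non-alpha (or empty) remainder
theorem pvGoB_alpha_run {t : Char} {ts rest : List Char} (ht : PySem.Chars.isalpha t = true)
    (hts : ∀ x ∈ ts, PySem.Chars.isalpha x = true)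
    (hrest : ∀ c cs', rest = c :: cs' → PySem.Chars.isalpha c = false) :
    pvGoB (t :: (ts ++ rest)) =
      (match (t :: ts).getLast? with
       | none => t :: ts
       | some l => if PySem.Chars.lowerChar l ∉ ['a', 'u', 'i', 'o', 'e'] then (t :: ts) ++ pvSfxB l
                   else t :: ts)
      ++ pvGoB rest := by
  rw [pvGoB]
  have hpred : (fun d => PySem.Chars.isalpha d == PySem.Chars.isalpha t)
      = (fun d => PySem.Chars.isalpha d) := by funext d; simp [ht]
  rw [hpred]
  cases rest with
  | nil =>
    have h := pvTakeWhile_all (p := fun d => PySem.Chars.isalpha d) (l := ts) hts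
    simp [ht, h.1, h.2, pvGoB_nil]
  | cons c cs' =>
    have hc := hrest c cs' rfl
    have h := pvTakeWhile_append (p := fun d => PySem.Chars.isalpha d) (l := ts) (r := cs') hts hc
    simp [ht, h.1, h.2]

theorem pvMain (cs : List Char) : ∀ (temp : List Char),
    (∀ x ∈ temp, PySem.Chars.isalpha x = true) →
    pvFinalA (cs.foldl pvStepA ([], temp)) = pvGoB (temp ++ cs) := by
  induction cs with
  | nil =>
    intro temp htemp
    cases temp with
    | nil => simp [pvFinalA, pvGoB_nil]
    | cons t ts =>
      have hrun := pvGoB_alpha_run (ts := ts) (rest := ([] : List Char))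
        (htemp t (by simp)) (fun x hx => htemp x (by simp [hx])) (by intro c cs' h; cases h)
      simp only [List.append_nil, pvGoB_nil] at hrun
      cases h : (t :: ts).getLast? with
      | none => simp at h
      | some l =>
        simp only [List.foldl_nil, List.append_nil, List.nil_append, hrun, pvFinalA, h,
          pvVowelsA, List.mem_cons, List.not_mem_nil]
        split_ifs <;> first | rfl | simp [pvSfxA, pvSfxB] | tauto
  | cons c cs ih =>
    intro temp htemp
    by_cases hc : PySem.Chars.isalpha c
    · have : pvStepA ([], temp) c = ([], temp ++ [c]) := by simp [pvStepA, hc]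
      rw [List.foldl_cons, this, ih (temp ++ [c])
        (by intro x hx; rcases List.mem_append.1 hx with h | h
            · exact htemp x h
            · simp at h; simp [h, hc])]
      simp
    · have hc' : PySem.Chars.isalpha c = false := by simpa using hc
      -- A's step flushes temp' ++ [c] into w; the rest of the fold only appends to w
      have hstep : pvStepA ([], temp) c =
          ((match temp.getLast? with
            | none => temp
            | some l => if PySem.Chars.lowerChar l ∉ pvVowelsA then temp ++ pvSfxA l else temp) ++ [c], []) := by
        simp [pvStepA, hc']
      set temp' : List Char :=
        (match temp.getLast? with
         | none => temp
         | some l => if PySem.Chars.lowerChar l ∉ pvVowelsA then temp ++ pvSfxA l else temp) with htemp'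
      rw [List.foldl_cons, hstep, pvFoldA_w]
      have hfin : pvFinalA ((temp' ++ [c]) ++ (cs.foldl pvStepA ([], [])).1,
          (cs.foldl pvStepA ([], [])).2) =
          (temp' ++ [c]) ++ pvFinalA (cs.foldl pvStepA ([], [])) := by
        simp only [pvFinalA]
        cases (cs.foldl pvStepA ([], [])).2.getLast? with
        | none => simp
        | some l => by_cases h : PySem.Chars.lowerChar l ∈ pvVowelsA <;> simp [h]
      rw [hfin, ih [] (by simp)]
      cases temp with
      | nil => simp [htemp', pvGoB_cons_nonalpha hc']
      | cons t ts =>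
        have hrun := pvGoB_alpha_run (ts := ts) (rest := c :: cs)
          (htemp t (by simp)) (fun x hx => htemp x (by simp [hx]))
          (by intro d ds h; cases h; exact hc')
        rw [show (t :: ts) ++ c :: cs = t :: (ts ++ c :: cs) by simp, hrun,
          pvGoB_cons_nonalpha hc']
        cases h : (t :: ts).getLast? with
        | none => simp at h
        | some l =>
          simp only [htemp', h, pvVowelsA, List.mem_cons, List.not_mem_nil]
          split_ifs <;> first | simp [pvSfxA, pvSfxB] | tauto

-- ===== VERDICT (by name: the statement is the Claim_ definition above) =====
theorem err_bob_spec : Claim_equal_err_bob := by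
  intro st _
  unfold Spec_err_bob err_bob err_bob_alt
  rw [pvMain st.toList [] (by simp)]
  simp
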